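-- pv_equiv track=rewrite | github.com/Ananya1812/dojo_practice | 6th-belt-py/working solutions/maxSum.py | sumOperations
-- ===== SOURCE A (Python) =====
-- def sumOperations(n,index,max_sum):
--     def is_valid(value):
--         left_elements = index
--         if value>left_elements:
--             left_sum = (value - left_elements + value - 1) * left_elements // 2
--         else:
--             left_sum = value * (value-1) // 2 + (left_elements - value + 1)
--
--         right_elements = n - index - 1
--         if value>right_elements:
--             reight_sum = (value - right_elements + value - 1) * right_elements //2
--         else:
--             reight_sum = value * (value-1) // 2 + (right_elements - value + 1)
--
--         total_sum = left_sum+reight_sum+value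
--         return total_sum<=max_sum
--
--     low = -1
--     high = max_sum
--     answer = 0
--     while low<=high:
--         mid = (low+high) // 2
--         if is_valid(mid):
--             answer = mid
--             low = mid + 1
--         else:
--             high = mid - 1
--
--     return answer
-- ===== SOURCE B (Python) =====
-- def sumOperations(n, index, max_sum):
--     def tri(t):
--         return t * (t + 1) // 2
--
--     def side(v, k):
--         # cost of one side of the peak: a descending run capped below by 1,
--         # written as a difference of triangular numbers plus the padding 1's
--         m = min(k, v - 1)
--         return tri(v - 1) - tri(v - 1 - m) + max(k - v + 1, 0)
--
--     def total(v):
--         return side(v, index) + side(v, n - index - 1) + v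
--
--     def search(lo, hi):
--         if lo > hi:
--             return None
--         mid = (lo + hi) // 2
--         if total(mid) <= max_sum:
--             r = search(mid + 1, hi)
--             return mid if r is None else r
--         return search(lo, mid - 1)
--
--     r = search(-1, max_sum)
--     return 0 if r is None else r
-- ===== Notes on version B (the rewrite author's own statement) =====
-- stated objective: alternative
-- what changed: B replaces A's iterative accumulator loop and four-way branchy per-side cost with a recursive Option-returning search over the same interval and a single branch-free closed-form side cost (difference of triangular numbers plus clamped padding); A's exact result is path-dependent (its low=-1 search can miss the true maximum when max_sum is within 3 of n), so B reproduces the search semantics exactly rather than a closed-form inversion.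
import Mathlib
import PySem

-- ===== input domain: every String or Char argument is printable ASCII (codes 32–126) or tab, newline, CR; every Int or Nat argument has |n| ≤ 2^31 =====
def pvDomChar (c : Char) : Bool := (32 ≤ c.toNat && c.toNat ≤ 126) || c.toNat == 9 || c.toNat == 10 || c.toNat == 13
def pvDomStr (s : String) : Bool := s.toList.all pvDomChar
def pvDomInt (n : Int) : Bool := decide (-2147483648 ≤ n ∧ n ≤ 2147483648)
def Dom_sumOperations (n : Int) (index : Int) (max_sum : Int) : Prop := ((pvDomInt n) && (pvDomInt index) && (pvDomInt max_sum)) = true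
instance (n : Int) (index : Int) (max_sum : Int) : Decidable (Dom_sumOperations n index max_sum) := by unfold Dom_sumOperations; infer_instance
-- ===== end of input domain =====

-- B restructures A (no speed claim): recursive Option-returning search plus a single
-- branch-free closed-form side cost, in place of A's accumulator loop with branchy sums.


-- ===== PORT A =====
-- is_valid(value) from A, branch for branch
def pvIsValid (n : Int) (index : Int) (max_sum : Int) (value : Int) : Bool :=
  let left_elements := index
  let left_sum :=
    if value > left_elements then
      PySem.Int.floordiv ((value - left_elements + value - 1) * left_elements) 2
    else
      PySem.Int.floordiv (value * (value - 1)) 2 + (left_elements - value + 1)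
  let right_elements := n - index - 1
  let reight_sum :=
    if value > right_elements then
      PySem.Int.floordiv ((value - right_elements + value - 1) * right_elements) 2
    else
      PySem.Int.floordiv (value * (value - 1)) 2 + (right_elements - value + 1)
  let total_sum := left_sum + reight_sum + value
  total_sum ≤ max_sum

-- A's while loop, as fuel-guarded recursion on the shrinking interval with the `answer`
-- accumulator; fuel = max_sum + 2 bounds the interval length, so the 0-fuel arm is never hit
def pvLoopA (n : Int) (index : Int) (max_sum : Int) : Nat → Int → Int → Int → Int
  | 0, _, _, answer => answer
  | fuel + 1, low, high, answer =>
    if low ≤ high then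
      let mid := PySem.Int.floordiv (low + high) 2
      if pvIsValid n index max_sum mid then
        pvLoopA n index max_sum fuel (mid + 1) high mid
      else
        pvLoopA n index max_sum fuel low (mid - 1) answer
    else answer

def sumOperations (n : Int) (index : Int) (max_sum : Int) : Int :=
  pvLoopA n index max_sum (max_sum + 2).toNat (-1) max_sum 0

-- ===== PORT B =====
def altTri (t : Int) : Int := PySem.Int.floordiv (t * (t + 1)) 2

def altSide (v : Int) (k : Int) : Int :=
  let m := min k (v - 1)
  altTri (v - 1) - altTri (v - 1 - m) + max (k - v + 1) 0

def altTotal (n : Int) (index : Int) (v : Int) : Int :=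
  altSide v index + altSide v (n - index - 1) + v

-- fuel-guarded recursion; fuel bounds the interval length, the 0-fuel arm is never hit
def altSearch (n : Int) (index : Int) (max_sum : Int) : Nat → Int → Int → Option Int
  | 0, _, _ => none
  | fuel + 1, lo, hi =>
    if lo > hi then none
    else
      let mid := PySem.Int.floordiv (lo + hi) 2
      if altTotal n index mid ≤ max_sum then
        match altSearch n index max_sum fuel (mid + 1) hi with
        | none => some mid
        | some r => some r
      else altSearch n index max_sum fuel lo (mid - 1)

def sumOperations_alt (n : Int) (index : Int) (max_sum : Int) : Int :=
  (altSearch n index max_sum (max_sum + 2).toNat (-1) max_sum).getD 0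

-- ===== PRECONDITION & SPEC =====
def Spec_sumOperations (n : Int) (index : Int) (max_sum : Int) (out : Int) : Prop := out = sumOperations_alt n index max_sum
instance (n : Int) (index : Int) (max_sum : Int) (out : Int) : Decidable (Spec_sumOperations n index max_sum out) := by unfold Spec_sumOperations; infer_instance

-- ===== CLAIM (what is proved, stated in full; the proofs are below) =====
def Claim_equal_sumOperations : Prop := ∀ (n : Int) (index : Int) (max_sum : Int), Dom_sumOperations n index max_sum → Spec_sumOperations n index max_sum (sumOperations n index max_sum)

-- ===== LEMMAS AND PROOFS =====

-- A's branchy per-side cost equals B's closed form, for all integers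
theorem side_eq (v k : Int) :
    (if v > k then PySem.Int.floordiv ((v - k + v - 1) * k) 2
     else PySem.Int.floordiv (v * (v - 1)) 2 + (k - v + 1)) = altSide v k := by
  simp only [altSide, altTri]
  split_ifs with hvk
  · rw [show min k (v - 1) = k from by omega]
    rw [PySem.Int.floordiv_eq_ediv_of_pos (by norm_num : (0:Int) < 2),
        PySem.Int.floordiv_eq_ediv_of_pos (by norm_num : (0:Int) < 2),
        PySem.Int.floordiv_eq_ediv_of_pos (by norm_num : (0:Int) < 2)]
    have hring : (v - k + v - 1) * k + (v - 1 - k) * (v - 1 - k + 1) = (v - 1) * (v - 1 + 1) := by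
      ring
    have hB : (v - 1 - k) * (v - 1 - k + 1) % 2 = 0 :=
      Int.even_iff.mp (Int.even_mul_succ_self (v - 1 - k))
    have hC : (v - 1) * (v - 1 + 1) % 2 = 0 :=
      Int.even_iff.mp (Int.even_mul_succ_self (v - 1))
    omega
  · rw [show min k (v - 1) = v - 1 from by omega]
    rw [PySem.Int.floordiv_eq_ediv_of_pos (by norm_num : (0:Int) < 2),
        PySem.Int.floordiv_eq_ediv_of_pos (by norm_num : (0:Int) < 2),
        PySem.Int.floordiv_eq_ediv_of_pos (by norm_num : (0:Int) < 2)]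
    have hring : v * (v - 1) = (v - 1) * (v - 1 + 1) := by ring
    have hC : (v - 1) * (v - 1 + 1) % 2 = 0 :=
      Int.even_iff.mp (Int.even_mul_succ_self (v - 1))
    omega

theorem isValid_eq (n index max_sum v : Int) :
    pvIsValid n index max_sum v = decide (altTotal n index v ≤ max_sum) := by
  simp only [pvIsValid, altTotal, decide_eq_decide]
  rw [side_eq v index, side_eq v (n - index - 1)]

-- A's accumulator loop equals B's Option-returning search with the accumulator as default
theorem loop_eq_search (n index max_sum : Int) : ∀ (fuel : Nat) (lo hi ans : Int),
    (hi + 1 - lo).toNat ≤ fuel →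
    pvLoopA n index max_sum fuel lo hi ans = (altSearch n index max_sum fuel lo hi).getD ans := by
  intro fuel
  induction fuel with
  | zero =>
    intro lo hi ans hf
    simp [pvLoopA, altSearch]
  | succ m ih =>
    intro lo hi ans hf
    rw [pvLoopA, altSearch]
    by_cases hle : lo ≤ hi
    · have hmid := PySem.Int.floordiv_two_mid_bounds hle
      simp only [hle, if_true, show ¬ lo > hi by omega, if_false]
      rw [isValid_eq]
      by_cases hv : altTotal n index (PySem.Int.floordiv (lo + hi) 2) ≤ max_sum
      · simp only [hv, decide_true, if_true]
        rw [ih _ _ _ (by omega)]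
        cases altSearch n index max_sum m (PySem.Int.floordiv (lo + hi) 2 + 1) hi <;> simp
      · simp only [hv, decide_false, if_false]
        exact ih _ _ _ (by omega)
    · simp [hle, show lo > hi by omega]

-- ===== VERDICT (by name: the statement is the Claim_ definition above) =====
theorem sumOperations_spec : Claim_equal_sumOperations := by
  intro n index max_sum _
  unfold Spec_sumOperations sumOperations sumOperations_alt
  exact loop_eq_search n index max_sum (max_sum + 2).toNat (-1) max_sum 0 (by omega)
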